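-- pv_equiv track=rewrite | github.com/AntonVanke/MicroPython-uFont | bmftest.py | byte_to_bit
-- ===== SOURCE A (Python) =====
-- def byte_to_bit(byte_arr, font_size):
--     """
--     :param byte_arr:
--     :param font_size:
--     :return:
--     """
--     temp2_arr = []
--     for _ in range(len(byte_arr)):
--         temp_arr = []
--         for i in range(7, -1, -1):
--             temp_arr.append(byte_arr[_] >> i & 1)
--         temp2_arr.extend(temp_arr)
--     bit_arr = []
--     for _ in range(0, len(temp2_arr), font_size):
--         bit_arr.append(temp2_arr[_: _ + font_size])
--     return bit_arr
-- ===== SOURCE B (Python) =====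
-- def byte_to_bit(byte_arr, font_size):
--     """
--     :param byte_arr:
--     :param font_size:
--     :return:
--     """
--     n = 8 * len(byte_arr)
--     rows = -(-n // font_size)  # ceil(n / font_size); <= 0 when font_size < 0
--     return [[byte_arr[j >> 3] >> (7 - (j & 7)) & 1
--              for j in range(k * font_size, min((k + 1) * font_size, n))]
--             for k in range(rows)]
-- ===== Notes on version B (the rewrite author's own statement) =====
-- stated objective: alternative
-- what changed: B drops A's intermediate flat bit list entirely: it computes the row count by ceiling division and reads each output bit directly from byte_arr via index arithmetic (byte_arr[j >> 3] >> (7 - (j & 7)) & 1), instead of A's expand-extend pass followed by a slicing pass.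
import Mathlib
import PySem

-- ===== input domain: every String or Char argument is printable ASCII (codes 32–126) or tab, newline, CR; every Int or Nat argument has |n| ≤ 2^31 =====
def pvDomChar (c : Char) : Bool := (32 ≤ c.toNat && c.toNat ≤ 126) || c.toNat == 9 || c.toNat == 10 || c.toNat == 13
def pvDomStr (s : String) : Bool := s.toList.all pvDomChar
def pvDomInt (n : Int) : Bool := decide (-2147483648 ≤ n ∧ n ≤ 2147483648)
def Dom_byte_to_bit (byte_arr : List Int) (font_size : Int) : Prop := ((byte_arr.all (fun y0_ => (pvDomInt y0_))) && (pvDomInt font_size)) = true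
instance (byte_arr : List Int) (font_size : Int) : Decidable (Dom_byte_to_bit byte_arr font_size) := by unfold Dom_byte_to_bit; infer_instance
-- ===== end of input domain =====

-- B replaces A's flatten-then-slice two-pass construction by direct bit addressing:
-- row k, position j reads bit j of the stream as byte_arr[j >> 3] >> (7 - (j & 7)) & 1,
-- with the row count obtained by ceiling division (objective: alternative, no intermediate flat list).

-- ===== PORT A =====
def byte_to_bit (byte_arr : List Int) (font_size : Int) : List (List Int) :=
  -- temp2_arr: for _ in range(len(byte_arr)): temp_arr = [...8 bits...]; temp2_arr.extend(temp_arr)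
  let temp2_arr : List Int :=
    (PySem.List.pyRange 0 byte_arr.length 1).foldl (fun acc j =>
      acc ++ (PySem.List.pyRange 7 (-1) (-1)).foldl (fun t i =>
        t ++ [PySem.Int.band (PySem.List.pyGetD byte_arr j 0 >>> i.toNat) 1]) []) []
  -- bit_arr: for _ in range(0, len(temp2_arr), font_size): bit_arr.append(temp2_arr[_ : _ + font_size])
  (PySem.List.pyRange 0 temp2_arr.length font_size).foldl (fun acc s =>
    acc ++ [PySem.List.slice temp2_arr (some s) (some (s + font_size))]) []

-- ===== PORT B =====
def byte_to_bit_alt (byte_arr : List Int) (font_size : Int) : List (List Int) :=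
  let n : Int := 8 * byte_arr.length
  let rows : Int := -(PySem.Int.floordiv (-n) font_size)
  (PySem.List.pyRange 0 rows 1).map (fun k =>
    (PySem.List.pyRange (k * font_size) (min ((k + 1) * font_size) n) 1).map (fun (j : Int) =>
      PySem.Int.band (PySem.List.pyGetD byte_arr (j >>> (3 : Nat)) 0 >>> ((7 - PySem.Int.band j 7).toNat)) 1))

-- ===== PRECONDITION & SPEC =====
-- Pre_ excludes exactly font_size = 0, where A raises ValueError (range() with step 0).
def Pre_byte_to_bit (byte_arr : List Int) (font_size : Int) : Prop := font_size ≠ 0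
instance (byte_arr : List Int) (font_size : Int) : Decidable (Pre_byte_to_bit byte_arr font_size) := by unfold Pre_byte_to_bit; infer_instance
def pvWitness_byte_to_bit : List Int × Int := ([255, 3], 4)

def Spec_byte_to_bit (byte_arr : List Int) (font_size : Int) (out : List (List Int)) : Prop := out = byte_to_bit_alt byte_arr font_size
instance (byte_arr : List Int) (font_size : Int) (out : List (List Int)) : Decidable (Spec_byte_to_bit byte_arr font_size out) := by unfold Spec_byte_to_bit; infer_instance

-- ===== CLAIM (what is proved, stated in full; the proofs are below) =====
def Claim_equal_byte_to_bit : Prop := ∀ (byte_arr : List Int) (font_size : Int), Dom_byte_to_bit byte_arr font_size → Pre_byte_to_bit byte_arr font_size → Spec_byte_to_bit byte_arr font_size (byte_to_bit byte_arr font_size)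

-- ===== LEMMAS AND PROOFS =====

def pvExpand (b : Int) : List Int :=
  [PySem.Int.band (b >>> (7:Int)) 1, PySem.Int.band (b >>> (6:Int)) 1, PySem.Int.band (b >>> (5:Int)) 1,
   PySem.Int.band (b >>> (4:Int)) 1, PySem.Int.band (b >>> (3:Int)) 1, PySem.Int.band (b >>> (2:Int)) 1,
   PySem.Int.band (b >>> (1:Int)) 1, PySem.Int.band (b >>> (0:Int)) 1]

lemma pvInner_eq (b : Int) :
    (PySem.List.pyRange 7 (-1) (-1)).foldl (fun t i => t ++ [PySem.Int.band (b >>> i.toNat) 1]) []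
      = pvExpand b := by
  rw [show PySem.List.pyRange 7 (-1) (-1) = [7,6,5,4,3,2,1,0] from by decide]
  norm_num [List.foldl, pvExpand]

lemma pvTemp2_eq (byte_arr : List Int) :
    (PySem.List.pyRange 0 byte_arr.length 1).foldl (fun acc j =>
      acc ++ (PySem.List.pyRange 7 (-1) (-1)).foldl (fun t i =>
        t ++ [PySem.Int.band (PySem.List.pyGetD byte_arr j 0 >>> i.toNat) 1]) []) []
      = byte_arr.flatMap pvExpand := by
  rw [PySem.List.foldl_pyRange_zero_pyGetD' byte_arr 0
      (fun acc b => acc ++ (PySem.List.pyRange 7 (-1) (-1)).foldl (fun t i =>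
        t ++ [PySem.Int.band (b >>> i.toNat) 1]) []) []]
  simp only [pvInner_eq]
  rw [PySem.List.foldl_append_eq_flatMap pvExpand byte_arr []]
  rfl

lemma pvFlat_length (byte_arr : List Int) : (byte_arr.flatMap pvExpand).length = 8 * byte_arr.length := by
  induction byte_arr with
  | nil => rfl
  | cons x xs ih =>
    have h8 : (pvExpand x).length = 8 := rfl
    simp only [List.flatMap_cons, List.length_append, ih, List.length_cons, h8]; ring

lemma pvFlat_getElem (byte_arr : List Int) (j : Nat) (h : j < 8 * byte_arr.length) :
    (byte_arr.flatMap pvExpand)[j]'(by rw [pvFlat_length]; exact h)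
      = PySem.Int.band (byte_arr.getD (j / 8) 0 >>> ((7 - j % 8 : Nat) : Int)) 1 := by
  induction byte_arr generalizing j with
  | nil => simp at h
  | cons x xs ih =>
    simp only [List.flatMap_cons]
    by_cases hj : j < 8
    · rw [List.getElem_append_left (by simp [pvExpand]; omega)]
      have hj8 : j / 8 = 0 := by omega
      rw [hj8]
      interval_cases j <;> norm_num [pvExpand]
    · obtain ⟨m, rfl⟩ : ∃ m, j = m + 8 := ⟨j - 8, by omega⟩
      have hlen : (pvExpand x).length = 8 := rfl
      rw [List.getElem_append_right (by omega)]
      simp only [hlen]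
      have h1 : (m + 8) / 8 = m / 8 + 1 := by omega
      have h2 : (m + 8) % 8 = m % 8 := by omega
      rw [h1, h2]
      have := ih m (by simp at h; omega)
      simpa using this

lemma pvBitfun_eq (byte_arr : List Int) (m : Nat) :
    PySem.Int.band (PySem.List.pyGetD byte_arr ((m : Int) >>> (3 : Nat)) 0 >>> ((7 - PySem.Int.band (m : Int) 7).toNat)) 1
      = PySem.Int.band (byte_arr.getD (m / 8) 0 >>> ((7 - m % 8 : Nat) : Int)) 1 := by
  have hs : (m : Int) >>> (3 : Nat) = ((m >>> 3 : Nat) : Int) := (Int.natCast_shiftRight m 3).symm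
  have hb : PySem.Int.band (m : Int) 7 = ((m &&& 7 : Nat) : Int) := by
    have := PySem.Int.band_natCast m 7
    simpa using this
  have h1 : m >>> 3 = m / 8 := by rw [Nat.shiftRight_eq_div_pow]
  have h2 : m &&& 7 = m % 8 := by
    have := Nat.and_two_pow_sub_one_eq_mod m 3
    norm_num at this
    exact this
  rw [Int.shiftRight_natCast_right, hs, hb, h1, h2, PySem.List.pyGetD_natCast,
    show ((7:Int) - ((m % 8 : Nat):Int)).toNat = 7 - m % 8 from by omega]


lemma pvMain (byte_arr : List Int) (font_size : Int) (hpre : font_size ≠ 0) :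
    byte_to_bit byte_arr font_size = byte_to_bit_alt byte_arr font_size := by
  simp only [byte_to_bit, byte_to_bit_alt, pvTemp2_eq]
  set bits := byte_arr.flatMap pvExpand with hbits
  have hlen : bits.length = 8 * byte_arr.length := pvFlat_length byte_arr
  rcases lt_or_gt_of_ne hpre with hfs | hfs
  · -- font_size < 0 : both sides are []
    have hA : PySem.List.pyRange 0 (bits.length : Int) font_size = [] := by
      simp only [PySem.List.pyRange, if_neg hpre]
      rw [if_neg (by omega : ¬ (0:Int) < font_size), if_neg (by omega : ¬ ((bits.length : Int) < 0))]
      rfl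
    have hrows : -(PySem.Int.floordiv (-(8 * (byte_arr.length : Int))) font_size) ≤ 0 := by
      have h1 : PySem.Int.floordiv (-(8 * (byte_arr.length : Int))) font_size
          = PySem.Int.floordiv (8 * (byte_arr.length : Int)) (-font_size) := by
        rw [← PySem.Int.floordiv_neg_neg]; ring_nf
      have h2 : PySem.Int.floordiv (8 * (byte_arr.length : Int)) (-font_size)
          = (8 * (byte_arr.length : Int)) / (-font_size) := PySem.Int.floordiv_eq_ediv_of_pos (by omega)
      have h3 : 0 ≤ (8 * (byte_arr.length : Int)) / (-font_size) :=
        Int.ediv_nonneg (by positivity) (by omega)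
      omega
    rw [hA, PySem.List.pyRange_one_eq_nil hrows]
    rfl
  · -- font_size > 0
    have hcast : ((bits.length : Int)) = 8 * (byte_arr.length : Int) := by rw [hlen]; push_cast; ring
    rw [PySem.List.pyRange_of_pos 0 (bits.length : Int) hfs,
        PySem.List.foldl_append_singleton_eq_map, List.nil_append]
    simp only [sub_zero]
    set cnt : Nat := if (0:Int) < (bits.length : Int) then (((bits.length : Int) + font_size - 1) / font_size).toNat else 0 with hcnt
    have hrows : -(PySem.Int.floordiv (-(8 * (byte_arr.length : Int))) font_size) = (cnt : Int) := by
      rw [PySem.Int.neg_floordiv_neg_eq_iff_of_pos hfs]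
      by_cases h0 : (0:Int) < (bits.length : Int)
      · have hc : cnt = (((bits.length : Int) + font_size - 1) / font_size).toNat := by
          rw [hcnt, if_pos h0]
        have hdnn : 0 ≤ ((bits.length : Int) + font_size - 1) / font_size :=
          Int.ediv_nonneg (by omega) (le_of_lt hfs)
        have hd := Int.mul_ediv_add_emod ((bits.length : Int) + font_size - 1) font_size
        have hm0 := Int.emod_nonneg ((bits.length : Int) + font_size - 1) (by omega : font_size ≠ 0)
        have hm1 := Int.emod_lt_of_pos ((bits.length : Int) + font_size - 1) hfs
        have hcast2 : ((cnt : Nat) : Int) = ((bits.length : Int) + font_size - 1) / font_size := by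
          rw [hc]; omega
        rw [hcast2]
        constructor <;> nlinarith [hcast]
      · have hz : (bits.length : Int) = 0 := by omega
        have hc : cnt = 0 := by rw [hcnt, if_neg h0]
        rw [hc]
        push_cast
        omega
    rw [hrows, PySem.List.pyRange_zero_natCast]
    simp only [List.map_map]
    apply List.map_congr_left
    intro k hk
    simp only [Function.comp_apply]
    have hkc : k < cnt := List.mem_range.mp hk
    -- chunk bounds
    set a : Int := 0 + font_size * (k : Int) with ha
    have ha0 : 0 ≤ a := by positivity
    have hub : (k : Int) * font_size ≤ (bits.length : Int) := by
      -- k < cnt → k*fs < n + fs  … we need k*fs ≤ n; from k ≤ cnt - 1 and (cnt-1)*fs < n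
      by_cases h0 : (0:Int) < (bits.length : Int)
      · have hc : (cnt : Int) = ((bits.length : Int) + font_size - 1) / font_size := by
          rw [hcnt, if_pos h0]
          have : 0 ≤ ((bits.length : Int) + font_size - 1) / font_size :=
            Int.ediv_nonneg (by omega) (le_of_lt hfs)
          omega
        have hd := Int.mul_ediv_add_emod ((bits.length : Int) + font_size - 1) font_size
        have hm0 := Int.emod_nonneg ((bits.length : Int) + font_size - 1) (by omega : font_size ≠ 0)
        have hm1 := Int.emod_lt_of_pos ((bits.length : Int) + font_size - 1) hfs
        have hkc' : (k : Int) ≤ (cnt : Int) - 1 := by omega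
        nlinarith
      · have : cnt = 0 := by rw [hcnt, if_neg h0]
        omega
    -- per-chunk equality
    have e1 : (k : Int) * font_size = a := by rw [ha]; ring
    have e2 : ((k : Int) + 1) * font_size = a + font_size := by rw [ha]; ring
    rw [e1, e2, PySem.List.slice_toNat bits ha0 (by omega)]
    have hta : ((a.toNat : Nat) : Int) = a := Int.toNat_of_nonneg ha0
    apply List.ext_getElem
    · simp only [List.length_take, List.length_drop, List.length_map, PySem.List.length_pyRange_one]
      omega
    · intro i hi1 hi2
      rw [List.getElem_take, List.getElem_drop, List.getElem_map, PySem.List.getElem_pyRange_one]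
      have hidx : a.toNat + i < 8 * byte_arr.length := by
        simp only [List.length_take, List.length_drop] at hi1
        omega
      have hm : a + (i : Int) = ((a.toNat + i : Nat) : Int) := by push_cast; omega
      rw [hm, pvBitfun_eq byte_arr (a.toNat + i)]
      exact pvFlat_getElem byte_arr (a.toNat + i) hidx

-- ===== VERDICT (by name: the statement is the Claim_ definition above) =====
theorem byte_to_bit_spec : Claim_equal_byte_to_bit := by
  intro byte_arr font_size _ hpre
  exact pvMain byte_arr font_size hpre
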